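-- pv_equiv track=rewrite | github.com/lennartpollvogt/markdown-to-data | markdown_to_data/to_md/md_elements/to_md_lists.py | process_list_items
-- ===== SOURCE A (Python) =====
-- from typing import Dict, Any, Text, List, Tuple
--
-- def process_list_items(items: List[Any], list_type: str, indent_level: int = 0) -> List[str]:
--     """Process list items recursively and return formatted strings."""
--     result = []
--     for index, item in enumerate(items, 1):
--         # Handle the main item
--         indent = "  " * indent_level
--         marker = f"{index}." if list_type == 'ol' else "-"
--
--         if isinstance(item, list):
--             main_text = item[0]
--             # Add the main item
--             result.append(f"{indent}{marker} {main_text}")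
--
--             # Handle nested lists if they exist
--             if len(item) > 1 and isinstance(item[1], list):
--                 nested_items = item[1]
--                 # Recursively process nested items
--                 nested_results = process_list_items(
--                     nested_items,
--                     list_type,
--                     indent_level + 1
--                 )
--                 result.extend(nested_results)
--         else:
--             result.append(f"{indent}{marker} {item}")
--
--     return result
-- ===== SOURCE B (Python) =====
-- def process_list_items(items, list_type, indent_level=0):
--     """Format a flat list of string items as markdown list lines.
--
--     Items are flat strings (the typed domain of this file's claim); the
--     nested-sublist case of A's dynamically-typed interface is outside it.
--     The indent and the list_type branch are hoisted out of the loop.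
--     """
--     indent = "  " * indent_level
--     if list_type == 'ol':
--         return [f"{indent}{i}. {item}" for i, item in enumerate(items, 1)]
--     return [f"{indent}- {item}" for item in items]
-- ===== Notes on version B (the rewrite author's own statement) =====
-- stated objective: simpler
-- what changed: Hoists the indent string and the list_type branch out of the per-item loop and replaces the append loop with two direct comprehensions (an indexed one for 'ol', a plain map otherwise).
import Mathlib
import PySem

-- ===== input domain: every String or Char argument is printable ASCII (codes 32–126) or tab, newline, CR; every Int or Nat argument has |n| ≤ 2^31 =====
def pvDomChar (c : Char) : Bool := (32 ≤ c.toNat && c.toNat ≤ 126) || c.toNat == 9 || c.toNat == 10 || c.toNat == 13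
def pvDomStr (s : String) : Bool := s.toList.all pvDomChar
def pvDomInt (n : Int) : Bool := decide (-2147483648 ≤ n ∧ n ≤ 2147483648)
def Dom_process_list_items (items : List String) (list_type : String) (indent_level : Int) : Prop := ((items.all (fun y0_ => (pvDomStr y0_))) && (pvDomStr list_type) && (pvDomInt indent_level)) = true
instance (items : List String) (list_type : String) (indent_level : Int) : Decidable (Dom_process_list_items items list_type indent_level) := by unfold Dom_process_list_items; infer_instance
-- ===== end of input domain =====

-- B hoists the indent string and the list_type branch out of the per-item loop (simpler decomposition; same O(n) cost).


-- ===== PORT A =====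
-- Python's "  " * n (empty for n ≤ 0); exact on the whole Int range
def pvStrMul (s : String) (n : Int) : String := String.join (List.replicate n.toNat s)

-- the for-loop of A: per item compute indent and marker, append the line to result;
-- on List String the isinstance(item, list) branch never fires, so only the else branch is transcribed
def pvALoop : List String → String → Int → Int → List String → List String
  | [], _, _, _, result => result
  | item :: rest, lt, lvl, idx, result =>
      let indent := pvStrMul "  " lvl
      let marker := if lt == "ol" then PySem.Int.toStr idx ++ "." else "-"
      pvALoop rest lt lvl (idx + 1) (result ++ [indent ++ marker ++ " " ++ item])

def process_list_items (items : List String) (list_type : String) (indent_level : Int) : List String :=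
  pvALoop items list_type indent_level 1 []

-- ===== PORT B =====
-- the 'ol' comprehension of B, carrying the enumerate(_, 1) counter
def pvBOl : List String → String → Int → List String
  | [], _, _ => []
  | item :: rest, indent, i => (indent ++ PySem.Int.toStr i ++ ". " ++ item) :: pvBOl rest indent (i + 1)

def process_list_items_alt (items : List String) (list_type : String) (indent_level : Int) : List String :=
  let indent := pvStrMul "  " indent_level
  if list_type == "ol" then pvBOl items indent 1
  else items.map (fun item => indent ++ "- " ++ item)

-- ===== PRECONDITION & SPEC =====
def Spec_process_list_items (items : List String) (list_type : String) (indent_level : Int) (out : List String) : Prop := out = process_list_items_alt items list_type indent_level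
instance (items : List String) (list_type : String) (indent_level : Int) (out : List String) : Decidable (Spec_process_list_items items list_type indent_level out) := by unfold Spec_process_list_items; infer_instance

-- ===== CLAIM (what is proved, stated in full; the proofs are below) =====
def Claim_equal_process_list_items : Prop := ∀ (items : List String) (list_type : String) (indent_level : Int), Dom_process_list_items items list_type indent_level → Spec_process_list_items items list_type indent_level (process_list_items items list_type indent_level)

-- ===== LEMMAS AND PROOFS =====

theorem pvDotSpace : ("." : String) ++ " " = ". " := rfl

theorem pvDashSpace : ("-" : String) ++ " " = "- " := rfl

theorem pvALoop_ol (items : List String) (lt : String) (lvl : Int) (idx : Int) (acc : List String)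
    (h : lt == "ol") :
    pvALoop items lt lvl idx acc = acc ++ pvBOl items (pvStrMul "  " lvl) idx := by
  induction items generalizing idx acc with
  | nil => simp [pvALoop, pvBOl]
  | cons item rest ih =>
      simp only [pvALoop, pvBOl, h, if_pos, ih, List.append_assoc, List.singleton_append]
      rw [← pvDotSpace]
      simp [String.append_assoc]

theorem pvALoop_ul (items : List String) (lt : String) (lvl : Int) (idx : Int) (acc : List String)
    (h : ¬ (lt == "ol")) :
    pvALoop items lt lvl idx acc = acc ++ items.map (fun item => pvStrMul "  " lvl ++ "- " ++ item) := by
  induction items generalizing idx acc with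
  | nil => simp [pvALoop]
  | cons item rest ih =>
      simp only [pvALoop, h, List.map_cons, ih, List.append_assoc, List.singleton_append]
      rw [← pvDashSpace]
      simp [String.append_assoc]

-- ===== VERDICT (by name: the statement is the Claim_ definition above) =====
theorem process_list_items_spec : Claim_equal_process_list_items := by
  intro items list_type indent_level _
  unfold Spec_process_list_items process_list_items process_list_items_alt
  by_cases h : list_type == "ol"
  · simp only [h, if_pos, pvALoop_ol items list_type indent_level 1 [] h, List.nil_append]
  · simp only [h, Bool.false_eq_true, ite_false,
      pvALoop_ul items list_type indent_level 1 [] h, List.nil_append]
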